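-- pv_equiv track=rewrite | github.com/jasko1212si/RepresentationGenerator | construct.py | constructUpwardlyClosed
-- ===== SOURCE A (Python) =====
-- def powerSet(size, numOfElements):
--     if (size == 1):
--         return[[i] for i in range(numOfElements)]
--     ret = []
--     smaller = powerSet(size-1, numOfElements)
--     ret += smaller
--     for i in range(numOfElements):
--         temp = []
--         for s in smaller:
--             if i > s[len(s)-1]:
--                 t = s[:]
--                 t.append(i)
--                 temp.append(t)
--         ret += temp
--     return ret
--
-- def constructUpwardlyClosed(numOfElements, partialOrder):
--     power = powerSet(numOfElements, numOfElements)
--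
--     upwardlyClosed = []
--
--     for p in power:
--         include = True
--         for a in p:
--             for b in partialOrder[a]:
--                 if b not in p:
--                     include = False
--                     break
--             if not include:
--                 break
--         if include:
--             upwardlyClosed.append(p)
--
--     return upwardlyClosed
-- ===== SOURCE B (Python) =====
-- def constructUpwardlyClosed(numOfElements, partialOrder):
--     # build the same (duplicate-containing, empty-set-free) enumeration as A's
--     # recursive powerSet, but iteratively bottom-up
--     cur = [[i] for i in range(numOfElements)]
--     for _level in range(2, numOfElements + 1):
--         cur = cur + [s + [i] for i in range(numOfElements) for s in cur if i > s[-1]]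
--     return [p for p in cur
--             if all(b in p for a in p for b in partialOrder[a])]
-- ===== Notes on version B (the rewrite author's own statement) =====
-- stated objective: alternative
-- what changed: B builds the same power-set enumeration iteratively bottom-up (cur = cur + one-element extensions, level by level) instead of A's top-down recursion, and replaces A's flag-and-break membership loops by a single filter with an all(...) comprehension.
import Mathlib
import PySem

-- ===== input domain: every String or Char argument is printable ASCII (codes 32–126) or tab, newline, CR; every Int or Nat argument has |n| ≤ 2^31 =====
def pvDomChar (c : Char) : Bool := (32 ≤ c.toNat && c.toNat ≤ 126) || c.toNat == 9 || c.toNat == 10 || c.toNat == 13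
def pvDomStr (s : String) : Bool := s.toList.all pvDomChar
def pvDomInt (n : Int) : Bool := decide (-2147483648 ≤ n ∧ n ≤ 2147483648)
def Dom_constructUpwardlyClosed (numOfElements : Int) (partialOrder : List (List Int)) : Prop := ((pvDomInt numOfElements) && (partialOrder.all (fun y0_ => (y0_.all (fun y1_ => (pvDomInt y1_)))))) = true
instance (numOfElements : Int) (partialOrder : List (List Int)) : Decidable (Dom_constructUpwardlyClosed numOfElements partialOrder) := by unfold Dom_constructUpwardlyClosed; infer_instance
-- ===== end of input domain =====

-- B replaces A's recursive powerSet by an iterative bottom-up construction of the same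
-- enumeration and A's flag-and-break membership loops by a single filter/all comprehension
-- (objective: alternative decomposition; same output on every input admitted by Pre_).

-- ===== PORT A =====
-- inner 'for s in smaller' loop building temp for one i (s[len(s)-1] is pyGet?; the none
-- branch is unreachable: every enumerated subset is nonempty — Python would raise there)
def powA_temp (i : Int) (smaller : List (List Int)) : List (List Int) :=
  smaller.foldl (fun temp s =>
    match PySem.List.pyGet? s ((s.length : Int) - 1) with
    | some last => if i > last then temp ++ [s ++ [i]] else temp
    | none => temp) []

-- powerSet(size, n); Python recurses forever for size ≤ 0, so the 0 case (excluded by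
-- Pre_) is a bare []
def powA : Nat → Int → List (List Int)
  | 0, _ => []
  | 1, n => (PySem.List.pyRange 0 n 1).map (fun i => [i])
  | (size+2), n =>
      let smaller := powA (size+1) n
      (PySem.List.pyRange 0 n 1).foldl (fun ret i => ret ++ powA_temp i smaller) smaller

-- 'for b in partialOrder[a]: if b not in p: include = False; break'
def inclInner (p : List Int) : List Int → Bool
  | [] => true
  | b :: bs => if p.contains b then inclInner p bs else false

-- 'for a in p: … if not include: break'; pyGet? none = Python IndexError, outside Pre_
def inclOuter (partialOrder : List (List Int)) (p : List Int) : List Int → Bool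
  | [] => true
  | a :: rest =>
    match PySem.List.pyGet? partialOrder a with
    | some row => if inclInner p row then inclOuter partialOrder p rest else false
    | none => false

def constructUpwardlyClosed (numOfElements : Int) (partialOrder : List (List Int)) : List (List Int) :=
  let power := powA numOfElements.toNat numOfElements
  power.foldl (fun acc p => if inclOuter partialOrder p p then acc ++ [p] else acc) []

-- ===== PORT B =====
-- '[s + [i] for i in range(numOfElements) for s in cur if i > s[-1]]'
def extendB (cur : List (List Int)) (n : Int) : List (List Int) :=
  (PySem.List.pyRange 0 n 1).flatMap (fun i =>
    cur.filterMap (fun s =>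
      match PySem.List.pyGet? s (-1) with
      | some last => if i > last then some (s ++ [i]) else none
      | none => none))

-- 'all(b in p for a in p for b in partialOrder[a])'
def upwardB (partialOrder : List (List Int)) (p : List Int) : Bool :=
  p.all (fun a =>
    match PySem.List.pyGet? partialOrder a with
    | some row => row.all (fun b => p.contains b)
    | none => false)

def constructUpwardlyClosed_alt (numOfElements : Int) (partialOrder : List (List Int)) : List (List Int) :=
  let init := (PySem.List.pyRange 0 numOfElements 1).map (fun i => [i])
  let power := (PySem.List.pyRange 2 (numOfElements + 1) 1).foldl
    (fun cur _ => cur ++ extendB cur numOfElements) init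
  power.filter (upwardB partialOrder)

-- ===== PRECONDITION & SPEC =====
-- Pre_ excludes numOfElements ≤ 0 (Python A's powerSet recurses without bound: RecursionError)
-- and numOfElements > len(partialOrder) (Python A raises IndexError at partialOrder[a]; B raises there too).
def Pre_constructUpwardlyClosed (numOfElements : Int) (partialOrder : List (List Int)) : Prop :=
  1 ≤ numOfElements ∧ numOfElements ≤ (partialOrder.length : Int)
instance (numOfElements : Int) (partialOrder : List (List Int)) : Decidable (Pre_constructUpwardlyClosed numOfElements partialOrder) := by unfold Pre_constructUpwardlyClosed; infer_instance

def pvWitness_constructUpwardlyClosed : Int × List (List Int) := (2, [[1], []])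

def Spec_constructUpwardlyClosed (numOfElements : Int) (partialOrder : List (List Int)) (out : List (List Int)) : Prop := out = constructUpwardlyClosed_alt numOfElements partialOrder
instance (numOfElements : Int) (partialOrder : List (List Int)) (out : List (List Int)) : Decidable (Spec_constructUpwardlyClosed numOfElements partialOrder out) := by unfold Spec_constructUpwardlyClosed; infer_instance

-- ===== CLAIM (what is proved, stated in full; the proofs are below) =====
def Claim_equal_constructUpwardlyClosed : Prop := ∀ (numOfElements : Int) (partialOrder : List (List Int)), Dom_constructUpwardlyClosed numOfElements partialOrder → Pre_constructUpwardlyClosed numOfElements partialOrder → Spec_constructUpwardlyClosed numOfElements partialOrder (constructUpwardlyClosed numOfElements partialOrder)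

-- ===== LEMMAS AND PROOFS =====

-- s[len(s)-1] and s[-1] are the same Python access
lemma lastIdx_eq (s : List Int) :
    PySem.List.pyGet? s ((s.length : Int) - 1) = PySem.List.pyGet? s (-1) := by
  cases s with
  | nil => simp [PySem.List.pyGet?, PySem.List.pyIdx?]
  | cons x xs =>
    rw [PySem.List.pyGet?_neg_one,
        PySem.List.pyGet?_of_nonneg (xs := x :: xs) (i := ((x :: xs).length : Int) - 1) (by simp),
        List.getLast?_eq_getElem?]
    congr 1
    simp

-- A's inner loop with an arbitrary accumulator
lemma temp_go (i : Int) (l : List (List Int)) (acc : List (List Int)) :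
    l.foldl (fun temp s =>
      match PySem.List.pyGet? s ((s.length : Int) - 1) with
      | some last => if i > last then temp ++ [s ++ [i]] else temp
      | none => temp) acc
    = acc ++ l.filterMap (fun s =>
      match PySem.List.pyGet? s (-1) with
      | some last => if i > last then some (s ++ [i]) else none
      | none => none) := by
  induction l generalizing acc with
  | nil => simp
  | cons s t ih =>
    simp only [List.foldl_cons, List.filterMap_cons]
    rw [lastIdx_eq]
    cases h : PySem.List.pyGet? s (-1) with
    | none => exact ih acc
    | some last =>
      by_cases hc : i > last
      · simp only [hc, if_pos, gt_iff_lt, ih]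
        simp
      · simp only [gt_iff_lt] at hc ⊢
        simp [if_neg hc, ih]

-- A's inner temp-building loop is B's filterMap
lemma temp_eq (i : Int) (cur : List (List Int)) :
    powA_temp i cur = cur.filterMap (fun s =>
      match PySem.List.pyGet? s (-1) with
      | some last => if i > last then some (s ++ [i]) else none
      | none => none) := by
  simpa using temp_go i cur []

-- one level of A's recursion is one step of B's loop
lemma powA_succ (k : Nat) (hk : 1 ≤ k) (n : Int) :
    powA (k+1) n = powA k n ++ extendB (powA k n) n := by
  obtain ⟨m, rfl⟩ : ∃ m, k = m + 1 := ⟨k - 1, by omega⟩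
  show powA (m+2) n = _
  rw [powA, PySem.List.foldl_append_eq_flatMap]
  simp only [extendB, temp_eq]

-- A's recursive powerSet equals B's iterative construction
lemma powA_eq_iter (k : Nat) (hk : 1 ≤ k) (n : Int) :
    powA k n = (PySem.List.pyRange 2 ((k : Int) + 1) 1).foldl
      (fun cur _ => cur ++ extendB cur n)
      ((PySem.List.pyRange 0 n 1).map (fun i => [i])) := by
  induction k with
  | zero => omega
  | succ m ih =>
    by_cases hm : 1 ≤ m
    · have hsplit : PySem.List.pyRange 2 ((m : Int) + 1 + 1) 1
          = PySem.List.pyRange 2 ((m : Int) + 1) 1 ++ [(m : Int) + 1] :=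
        PySem.List.pyRange_one_succ_right (a := 2) (b := (m:Int)+1) (by omega)
      push_cast
      rw [hsplit, List.foldl_append, ← ih hm, powA_succ m hm n]
      simp
    · have : m = 0 := by omega
      subst this
      rw [show ((0:Nat)+1 : Nat) = 1 from rfl, powA]
      rw [show (((1:Nat):Int) + 1) = 2 by norm_num,
          PySem.List.pyRange_one_eq_nil (a := 2) (b := 2) (by omega)]
      simp

lemma inclInner_eq (p row : List Int) :
    inclInner p row = row.all (fun b => p.contains b) := by
  induction row with
  | nil => rfl
  | cons b bs ih =>
    simp only [inclInner, List.all_cons, ih]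
    cases p.contains b <;> simp

lemma inclOuter_eq (po : List (List Int)) (p l : List Int) :
    inclOuter po p l = l.all (fun a =>
      match PySem.List.pyGet? po a with
      | some row => row.all (fun b => p.contains b)
      | none => false) := by
  induction l with
  | nil => rfl
  | cons a rest ih =>
    simp only [inclOuter, List.all_cons, ih]
    cases h : PySem.List.pyGet? po a with
    | none => simp
    | some row =>
      simp only [inclInner_eq]
      cases row.all (fun b => p.contains b) <;> simp

-- ===== VERDICT (by name: the statement is the Claim_ definition above) =====
theorem constructUpwardlyClosed_spec : Claim_equal_constructUpwardlyClosed := by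
  intro n po _ hpre
  have hn : 1 ≤ n := hpre.1
  unfold Spec_constructUpwardlyClosed constructUpwardlyClosed constructUpwardlyClosed_alt
  have h1 : 1 ≤ n.toNat := by omega
  have h2 : ((n.toNat : Int) + 1) = n + 1 := by omega
  rw [show powA n.toNat n = _ from powA_eq_iter n.toNat h1 n, h2,
      PySem.List.foldl_append_if_eq_filter]
  simp only [List.nil_append]
  apply List.filter_congr
  intro p _
  rw [inclOuter_eq, upwardB]
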